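-- pv_equiv track=rewrite | github.com/alexander-held/advent-of-code-2019 | 01/puzzle.py | fuel_for_module_and_fuel
-- ===== SOURCE A (Python) =====
-- import math
--
-- def fuel_for_module(mass):
--     return max(0, math.floor(mass/3.0) - 2)
--
-- def fuel_for_module_and_fuel(mass):
--     fuel_per_mass = []
--     current_mass = mass
--     while current_mass > 0:
--         more_mass = fuel_for_module(current_mass)
--         current_mass = more_mass
--         fuel_per_mass.append(current_mass)
--     return sum(fuel_per_mass)
-- ===== SOURCE B (Python) =====
-- import math
--
-- def fuel_for_module(mass):
--     return max(0, math.floor(mass/3.0) - 2)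
--
-- def fuel_for_module_and_fuel(mass):
--     if mass <= 0:
--         return 0
--     f = fuel_for_module(mass)
--     if f <= 0:
--         return 0
--     return f + fuel_for_module_and_fuel(f)
-- ===== Notes on version B (the rewrite author's own statement) =====
-- stated objective: simpler
-- what changed: Replaces the while-loop that accumulates the fuel cascade into a list and then sums it with a direct recursion that adds each fuel term as it is computed, maintaining no list.
import Mathlib
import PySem

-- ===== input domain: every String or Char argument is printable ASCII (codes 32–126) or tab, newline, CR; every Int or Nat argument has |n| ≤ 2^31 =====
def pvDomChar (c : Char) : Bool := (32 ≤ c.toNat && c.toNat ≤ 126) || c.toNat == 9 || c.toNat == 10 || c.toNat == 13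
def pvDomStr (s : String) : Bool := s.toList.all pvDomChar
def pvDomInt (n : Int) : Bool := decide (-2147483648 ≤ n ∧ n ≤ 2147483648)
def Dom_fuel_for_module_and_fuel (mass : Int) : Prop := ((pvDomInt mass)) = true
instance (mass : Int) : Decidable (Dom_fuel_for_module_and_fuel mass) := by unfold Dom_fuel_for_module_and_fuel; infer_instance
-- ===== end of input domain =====

-- B replaces A's list-accumulating while loop by a direct recursion over the fuel cascade (simpler; no list).
-- Note: on |mass| ≤ 2^31 Python's math.floor(mass/3.0) equals floor division mass // 3 (the float quotient
-- cannot cross an integer at this magnitude), so both ports use PySem.Int.floordiv, exact on the domain.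

-- ===== PORT A =====
def fuel_for_module (mass : Int) : Int := max 0 (PySem.Int.floordiv mass 3 - 2)

theorem fuel_lt (m : Int) (h : 0 < m) : (fuel_for_module m).toNat < m.toNat := by
  have h3 : PySem.Int.floordiv m 3 = m / 3 := PySem.Int.floordiv_eq_ediv_of_pos (by omega)
  have := Int.ediv_le_self 3 (le_of_lt h)
  simp only [fuel_for_module, h3]
  omega

-- the while loop of A: collects each computed fuel value into a list
def fuelLoop (current : Int) : List Int :=
  if current > 0 then
    let more := fuel_for_module current
    more :: fuelLoop more
  else []
termination_by current.toNat
decreasing_by exact fuel_lt current (by omega)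

def fuel_for_module_and_fuel (mass : Int) : Int := (fuelLoop mass).sum

-- ===== PORT B =====
def fuel_for_module_and_fuel_alt (mass : Int) : Int :=
  if mass ≤ 0 then 0
  else
    let f := fuel_for_module mass
    if f ≤ 0 then 0
    else f + fuel_for_module_and_fuel_alt f
termination_by mass.toNat
decreasing_by exact fuel_lt mass (by omega)

-- ===== PRECONDITION & SPEC =====
def Spec_fuel_for_module_and_fuel (mass : Int) (out : Int) : Prop := out = fuel_for_module_and_fuel_alt mass
instance (mass : Int) (out : Int) : Decidable (Spec_fuel_for_module_and_fuel mass out) := by unfold Spec_fuel_for_module_and_fuel; infer_instance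

-- ===== CLAIM (what is proved, stated in full; the proofs are below) =====
def Claim_equal_fuel_for_module_and_fuel : Prop := ∀ (mass : Int), Dom_fuel_for_module_and_fuel mass → Spec_fuel_for_module_and_fuel mass (fuel_for_module_and_fuel mass)

-- ===== LEMMAS AND PROOFS =====
theorem fuel_nonneg (m : Int) : 0 ≤ fuel_for_module m := le_max_left 0 _

theorem sum_fuelLoop (m : Int) : (fuelLoop m).sum = fuel_for_module_and_fuel_alt m := by
  induction m using fuelLoop.induct with
  | case1 m hm more ih =>
    rw [fuelLoop, if_pos hm, fuel_for_module_and_fuel_alt, if_neg (by omega)]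
    have ih' : (fuelLoop (fuel_for_module m)).sum = fuel_for_module_and_fuel_alt (fuel_for_module m) := ih
    simp only [List.sum_cons, ih']
    by_cases hf : fuel_for_module m ≤ 0
    · have h0 : fuel_for_module m = 0 := le_antisymm hf (fuel_nonneg m)
      rw [if_pos hf, h0, fuel_for_module_and_fuel_alt, if_pos (le_refl 0)]; ring
    · rw [if_neg hf]
  | case2 m hm =>
    rw [fuelLoop, if_neg hm, fuel_for_module_and_fuel_alt, if_pos (by omega)]
    rfl

-- ===== VERDICT (by name: the statement is the Claim_ definition above) =====
theorem fuel_for_module_and_fuel_spec : Claim_equal_fuel_for_module_and_fuel := by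
  intro mass _
  show fuel_for_module_and_fuel mass = _
  exact sum_fuelLoop mass
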